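-- pv_equiv track=rewrite | github.com/okuchiri/K_SpecPart_C | scripts/compare_cpp_julia.py | normalize_partition_labels
-- ===== SOURCE A (Python) =====
-- def normalize_partition_labels(partition: list[int]) -> list[int]:
--     label_map: dict[int, int] = {}
--     normalized: list[int] = []
--     next_label = 0
--     for label in partition:
--         if label not in label_map:
--             label_map[label] = next_label
--             next_label += 1
--         normalized.append(label_map[label])
--     return normalized
-- ===== SOURCE B (Python) =====
-- def normalize_partition_labels(partition: list[int]) -> list[int]:
--     # An element's normalized label is the number of distinct labels that
--     # appear strictly before its first occurrence.
--     return [len(set(partition[:partition.index(x)])) for x in partition]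
-- ===== Notes on version B (the rewrite author's own statement) =====
-- stated objective: alternative
-- what changed: Replaces A's accumulated hash map and counter by a dict-free counting rule: each element's label is computed independently as the number of distinct labels in the prefix before its first occurrence (index scan + prefix set), trading A's O(n) single pass for an O(n^2) per-element computation.
import Mathlib
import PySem

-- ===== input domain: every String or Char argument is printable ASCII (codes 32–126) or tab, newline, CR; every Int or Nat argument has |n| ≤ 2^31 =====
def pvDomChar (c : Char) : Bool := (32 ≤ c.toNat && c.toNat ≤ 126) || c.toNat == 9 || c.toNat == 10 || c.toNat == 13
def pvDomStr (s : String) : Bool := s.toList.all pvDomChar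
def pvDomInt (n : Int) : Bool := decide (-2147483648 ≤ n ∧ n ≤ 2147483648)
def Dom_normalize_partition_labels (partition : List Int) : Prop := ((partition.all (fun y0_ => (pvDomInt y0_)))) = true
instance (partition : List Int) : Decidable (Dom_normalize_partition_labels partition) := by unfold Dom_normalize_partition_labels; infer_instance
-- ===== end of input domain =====

-- B drops A's accumulated label map and counter: each element's label is computed
-- independently as the number of distinct labels in the prefix before its first
-- occurrence (index scan + prefix set) — an alternative O(n^2) counting rule.


-- ===== PORT A =====
-- one loop step of A: maybe-insert into label_map (bumping next_label), then append label_map[label];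
-- label is always a key of label_map at the lookup, so getD's default 0 is never used (Python raises KeyError only on a missing key).
def stepA (s : PySem.Dict Int Int × List Int × Int) (label : Int) : PySem.Dict Int Int × List Int × Int :=
  let label_map := s.1
  let normalized := s.2.1
  let next_label := s.2.2
  let p := if label_map.contains label = false
           then (label_map.insert label next_label, next_label + 1)
           else (label_map, next_label)
  (p.1, normalized ++ [p.1.getD label 0], p.2)

def normalize_partition_labels (partition : List Int) : List Int :=
  (partition.foldl stepA (PySem.Dict.empty, [], 0)).2.1

-- ===== PORT B =====
-- [len(set(partition[:partition.index(x)])) for x in partition] —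
-- x is always a member of partition, so index? is always some and getD's default 0 is never used.
def normalize_partition_labels_alt (partition : List Int) : List Int :=
  partition.map (fun x =>
    ((PySem.Set.ofList
        (PySem.List.slice partition none
          (some (((PySem.List.index? partition x).getD 0 : Nat) : Int)))).length : Int))

-- ===== PRECONDITION & SPEC =====
def Spec_normalize_partition_labels (partition : List Int) (out : List Int) : Prop := out = normalize_partition_labels_alt partition
instance (partition : List Int) (out : List Int) : Decidable (Spec_normalize_partition_labels partition out) := by unfold Spec_normalize_partition_labels; infer_instance

-- ===== CLAIM (what is proved, stated in full; the proofs are below) =====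
def Claim_equal_normalize_partition_labels : Prop := ∀ (partition : List Int), Dom_normalize_partition_labels partition → Spec_normalize_partition_labels partition (normalize_partition_labels partition)

-- ===== LEMMAS AND PROOFS =====

-- ordered-dedup step and its extension of a given prefix (proof-only helpers)
def dstep (o : List Int) (x : Int) : List Int := if x ∈ o then o else o ++ [x]
def dapp (ord rest : List Int) : List Int := rest.foldl dstep ord

-- the value A assigns to x: its position in the first-appearance order o
def idxf (o : List Int) (x : Int) : Int := (((PySem.List.index? o x).getD 0 : Nat) : Int)

lemma dapp_nil (ord : List Int) : dapp ord [] = ord := rfl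

lemma dapp_cons (ord : List Int) (x : Int) (rest : List Int) :
    dapp ord (x :: rest) = dapp (dstep ord x) rest := rfl

lemma dapp_prefix (rest : List Int) : ∀ ord : List Int, ∃ t, dapp ord rest = ord ++ t := by
  induction rest with
  | nil => intro ord; exact ⟨[], by simp [dapp_nil]⟩
  | cons x rest ih =>
    intro ord
    rw [dapp_cons]
    by_cases hx : x ∈ ord
    · simpa [dstep, hx] using ih ord
    · obtain ⟨t, ht⟩ := ih (ord ++ [x])
      exact ⟨x :: t, by simp [dstep, hx, ht]⟩

lemma ofList_eq_dapp (xs : List Int) : PySem.Set.ofList xs = dapp [] xs := by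
  have h : ∀ (ys : List Int) (s : List Int), ys.foldl PySem.Set.add s = dapp s ys := by
    intro ys
    induction ys with
    | nil => intro s; rfl
    | cons y ys ih =>
      intro s
      rw [dapp_cons]
      have : PySem.Set.add s y = dstep s y := by simp [PySem.Set.add, dstep]
      simp only [List.foldl_cons, this, ih]
  calc PySem.Set.ofList xs = xs.foldl PySem.Set.add [] := rfl
    _ = dapp [] xs := h xs []

lemma idxf_extend {ord : List Int} {x : Int} (hx : x ∈ ord) (rest : List Int) :
    idxf (dapp ord rest) x = idxf ord x := by
  obtain ⟨t, ht⟩ := dapp_prefix rest ord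
  rw [ht, idxf, PySem.List.index?_append_of_mem t hx, idxf]

lemma A_loop (rest : List Int) : ∀ (ord : List Int) (d : PySem.Dict Int Int) (acc : List Int),
    ord.Nodup →
    (∀ l, d.contains l = decide (l ∈ ord)) →
    (∀ l, d.getD l 0 = idxf ord l) →
    (rest.foldl stepA (d, acc, (ord.length : Int))).2.1
      = acc ++ rest.map (fun x => idxf (dapp ord rest) x) := by
  induction rest with
  | nil => intro ord d acc _ _ _; simp [dapp_nil]
  | cons x rest ih =>
    intro ord d acc hnd hc hg
    rw [List.foldl_cons]
    by_cases hx : x ∈ ord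
    · -- seen before: dict, counter unchanged; emit its stored index
      have hstep : stepA (d, acc, (ord.length : Int)) x
          = (d, acc ++ [d.getD x 0], (ord.length : Int)) := by
        simp [stepA, hc x, hx]
      rw [hstep, ih ord d _ hnd hc hg, dapp_cons]
      have hds : dstep ord x = ord := by simp [dstep, hx]
      rw [hds, hg x, ← idxf_extend hx rest]
      simp
    · -- new label: insert it at position ord.length; emit ord.length
      have hstep : stepA (d, acc, (ord.length : Int)) x
          = (d.insert x (ord.length : Int),
             acc ++ [(ord.length : Int)], (ord.length : Int) + 1) := by
        simp [stepA, hc x, hx, PySem.Dict.getD_insert_self]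
      have hds : dstep ord x = ord ++ [x] := by simp [dstep, hx]
      have hnd' : (ord ++ [x]).Nodup := by
        refine List.Nodup.append hnd (List.nodup_singleton x) ?_
        intro a ha hax
        rw [List.mem_singleton] at hax
        exact hx (hax ▸ ha)
      have hc' : ∀ l, (d.insert x (ord.length : Int)).contains l = decide (l ∈ ord ++ [x]) := by
        intro l
        rw [PySem.Dict.contains_insert, hc l]
        by_cases hlx : l = x <;> simp [hlx]
      have hg' : ∀ l, (d.insert x (ord.length : Int)).getD l 0 = idxf (ord ++ [x]) l := by
        intro l
        rw [PySem.Dict.getD_insert]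
        by_cases hlx : l = x
        · subst hlx
          rw [idxf, PySem.List.index?_append_singleton_self ord l hx]
          simp
        · rw [if_neg hlx, hg l]
          unfold idxf
          by_cases hlo : l ∈ ord
          · rw [PySem.List.index?_append_of_mem [x] hlo]
          · have h2 : PySem.List.index? (ord ++ [x]) l = none := by
              rw [PySem.List.index?_eq_none_iff]
              simp [hlo, hlx]
            rw [h2, (PySem.List.index?_eq_none_iff ord l).mpr hlo]
      have hlen : ((ord ++ [x]).length : Int) = (ord.length : Int) + 1 := by simp
      rw [hstep, dapp_cons, hds]
      rw [show ((ord.length : Int) + 1) = ((ord ++ [x]).length : Int) from hlen.symm]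
      rw [ih (ord ++ [x]) _ _ hnd' hc' hg']
      have hxmem : x ∈ ord ++ [x] := by simp
      have hv : idxf (dapp (ord ++ [x]) rest) x = (ord.length : Int) := by
        rw [idxf_extend hxmem rest, idxf, PySem.List.index?_append_singleton_self ord x hx]
        simp
      simp [hv]

lemma mem_dapp_nil {a : Int} {xs : List Int} (h : a ∈ dapp [] xs) : a ∈ xs := by
  rw [← ofList_eq_dapp] at h
  simpa using (PySem.List.mem_dedup xs a).mp (by simpa using h)

-- A's value at x (its rank in the first-appearance order of the whole list)
-- equals B's value at x (the number of distinct labels before x's first occurrence).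
lemma rank_eq_prefix_count (partition : List Int) (x : Int) (hx : x ∈ partition) :
    idxf (dapp [] partition) x
      = ((PySem.Set.ofList
          (PySem.List.slice partition none
            (some (((PySem.List.index? partition x).getD 0 : Nat) : Int)))).length : Int) := by
  obtain ⟨k, hk⟩ := Option.isSome_iff_exists.mp ((PySem.List.index?_isSome_iff partition x).mpr hx)
  obtain ⟨pre, suf, hsplit, hlen, hnotin⟩ := (PySem.List.index?_eq_some_iff partition x k).mp hk
  have hslice : PySem.List.slice partition none
      (some (((PySem.List.index? partition x).getD 0 : Nat) : Int)) = pre := by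
    rw [hk, PySem.List.slice_to_natCast, hsplit, ← hlen]
    simp
  have hxpre : x ∉ dapp [] pre := fun h => hnotin (mem_dapp_nil h)
  have hA : idxf (dapp [] partition) x = ((dapp [] pre).length : Int) := by
    rw [hsplit]
    have : dapp [] (pre ++ x :: suf) = dapp (dstep (dapp [] pre) x) suf := by
      unfold dapp
      rw [List.foldl_append, List.foldl_cons]
    rw [idxf, this]
    have hds : dstep (dapp [] pre) x = dapp [] pre ++ [x] := by simp [dstep, hxpre]
    rw [hds]
    have hxm : x ∈ dapp [] pre ++ [x] := by simp
    have h2 := idxf_extend hxm suf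
    rw [idxf, idxf] at h2
    rw [h2, PySem.List.index?_append_singleton_self _ x hxpre]
    simp
  rw [hA, hslice, ofList_eq_dapp]

-- ===== VERDICT (by name: the statement is the Claim_ definition above) =====
theorem normalize_partition_labels_spec : Claim_equal_normalize_partition_labels := by
  intro partition _
  unfold Spec_normalize_partition_labels normalize_partition_labels normalize_partition_labels_alt
  have hA := A_loop partition [] PySem.Dict.empty []
    List.nodup_nil
    (fun l => by simp [PySem.Dict.contains_empty])
    (fun l => by
      have : PySem.List.index? ([] : List Int) l = none :=
        (PySem.List.index?_eq_none_iff [] l).mpr (by simp)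
      rw [idxf, this]; simp [PySem.Dict.getD_empty])
  simp only [List.length_nil, Nat.cast_zero, List.nil_append] at hA
  rw [hA]
  apply List.map_congr_left
  intro x hx
  exact rank_eq_prefix_count partition x hx
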